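-- pv_equiv track=rewrite | github.com/swantechindia/swanva | va_manager/vuln_data_service/index_builder.py | build_cpe_index
-- ===== SOURCE A (Python) =====
-- from collections import defaultdict
--
-- def build_cpe_index(cpe_entries: list[tuple[str, str]]) -> dict[str, tuple[str, ...]]:
--     """Build a deduplicated CPE-to-CVE mapping for O(1) lookups."""
--
--     index: dict[str, list[str]] = defaultdict(list)
--     seen_pairs: set[tuple[str, str]] = set()
--
--     for cpe_uri, cve_id in cpe_entries:
--         if not cpe_uri or not cve_id:
--             continue
--
--         key = (cpe_uri, cve_id)
--         if key in seen_pairs: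
--             continue
--
--         seen_pairs.add(key)
--         index[cpe_uri].append(cve_id)
--
--     return {cpe_uri: tuple(cve_ids) for cpe_uri, cve_ids in index.items()}
-- ===== SOURCE B (Python) =====
-- def build_cpe_index(cpe_entries):
--     """Staged: filter once, list the distinct CPEs, then rescan per CPE for its CVEs."""
--     valid = [(c, v) for c, v in cpe_entries if c and v]
--     keys = dict.fromkeys(c for c, _ in valid)
--     return {k: tuple(dict.fromkeys(v for c, v in valid if c == k)) for k in keys}
-- ===== Notes on version B (the rewrite author's own statement) =====
-- stated objective: alternative
-- what changed: Replaces the single-pass dict+seen_pairs accumulation by staged passes: filter the valid pairs, list the distinct CPE keys in first-occurrence order, then rescan the filtered list per key and dedup each group with dict.fromkeys; trades the incremental index for O(n*k) rescans.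
import Mathlib
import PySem

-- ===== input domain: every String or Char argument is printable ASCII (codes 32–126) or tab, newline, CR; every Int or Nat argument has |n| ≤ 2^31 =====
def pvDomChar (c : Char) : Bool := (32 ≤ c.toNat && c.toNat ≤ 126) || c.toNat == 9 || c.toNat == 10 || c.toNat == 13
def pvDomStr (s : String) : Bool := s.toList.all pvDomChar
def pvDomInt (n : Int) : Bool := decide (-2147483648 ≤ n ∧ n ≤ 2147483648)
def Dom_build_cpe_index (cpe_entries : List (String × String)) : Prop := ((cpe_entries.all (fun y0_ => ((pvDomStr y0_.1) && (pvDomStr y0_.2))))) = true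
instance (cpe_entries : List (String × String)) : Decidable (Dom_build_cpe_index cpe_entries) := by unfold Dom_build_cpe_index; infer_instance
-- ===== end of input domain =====

-- ===== PORT A =====
-- B replaces A's single-pass dict+seen_pairs accumulation by staged passes (filter, distinct keys, per-key rescan): alternative decomposition, not claimed faster.
def build_cpe_index (cpe_entries : List (String × String)) : List (String × List String) :=
  let st := cpe_entries.foldl
    (fun (st : PySem.Dict String (List String) × PySem.Set (String × String)) p =>
      if p.1 = "" ∨ p.2 = "" then st
      else if PySem.Set.contains st.2 p then st
      else (st.1.modify p.1 [] (· ++ [p.2]), PySem.Set.add st.2 p))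
    (PySem.Dict.empty, PySem.Set.empty)
  st.1.items.map (fun kv => (kv.1, kv.2))

-- ===== PORT B =====
def build_cpe_index_alt (cpe_entries : List (String × String)) : List (String × List String) :=
  let valid := cpe_entries.filter (fun p => !(p.1 == "") && !(p.2 == ""))
  let keys := PySem.List.dedup (valid.map Prod.fst)
  keys.map (fun k => (k, PySem.List.dedup ((valid.filter (fun p => p.1 == k)).map (fun q => q.2))))

-- ===== PRECONDITION & SPEC =====
def Spec_build_cpe_index (cpe_entries : List (String × String)) (out : List (String × List String)) : Prop := out = build_cpe_index_alt cpe_entries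
instance (cpe_entries : List (String × String)) (out : List (String × List String)) : Decidable (Spec_build_cpe_index cpe_entries out) := by unfold Spec_build_cpe_index; infer_instance

-- ===== CLAIM (what is proved, stated in full; the proofs are below) =====
def Claim_equal_build_cpe_index : Prop := ∀ (cpe_entries : List (String × String)), Dom_build_cpe_index cpe_entries → Spec_build_cpe_index cpe_entries (build_cpe_index cpe_entries)

-- ===== LEMMAS AND PROOFS =====

theorem dedup_snoc (v : List String) (c : String) :
    PySem.List.dedup (v ++ [c]) = if c ∈ v then PySem.List.dedup v else PySem.List.dedup v ++ [c] := by
  rw [PySem.List.dedup_eq_ofList, PySem.Set.ofList_append_singleton, PySem.Set.add_eq_ite]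
  by_cases h : c ∈ v
  · rw [if_pos (by rw [PySem.Set.mem_ofList]; exact h), if_pos h, ← PySem.List.dedup_eq_ofList]
  · rw [if_neg (by rw [PySem.Set.mem_ofList]; exact h), if_neg h, ← PySem.List.dedup_eq_ofList]

theorem find_mem_nodup {α : Type} (l : List (String × α)) (h : (l.map Prod.fst).Nodup)
    (q : String × α) (hq : q ∈ l) : l.find? (fun p => p.1 == q.1) = some q := by
  induction l with
  | nil => cases hq
  | cons a t ih =>
    simp only [List.map_cons, List.nodup_cons] at h
    rcases List.mem_cons.1 hq with rfl | hqt
    · simp [List.find?]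
    · have hne : a.1 ≠ q.1 := by
        intro he; exact h.1 (he ▸ List.mem_map_of_mem hqt)
      rw [List.find?_cons_of_neg (by simpa using hne)]
      exact ih h.2 hqt

def pvF : String × List String → String × List String := fun kv => (kv.1, PySem.List.dedup kv.2)

theorem get?_rel (dA dB : PySem.Dict String (List String)) (h1 : dA.items = dB.items.map pvF)
    (u : String) : dA.get? u = (dB.get? u).map PySem.List.dedup := by
  simp [PySem.Dict.get?, h1, List.find?_map, pvF, Function.comp_def]

theorem contains_rel (dA dB : PySem.Dict String (List String)) (h1 : dA.items = dB.items.map pvF)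
    (u : String) : dA.contains u = dB.contains u := by
  simp [PySem.Dict.contains, h1, List.any_map, pvF, Function.comp_def]

theorem contains_eq_isSome (d : PySem.Dict String (List String)) (u : String) :
    d.contains u = (d.get? u).isSome :=
  PySem.Dict.contains_eq_isSome_get? d u

theorem keys_insert_nodup (d : PySem.Dict String (List String)) (h : d.keys.Nodup)
    (k : String) (v : List String) : (d.insert k v).keys.Nodup :=
  PySem.Dict.nodup_keys_foldl_insert_key [v] (fun _ => k) (fun _ x => x) d h

theorem getD_rel (dA dB : PySem.Dict String (List String)) (h1 : dA.items = dB.items.map pvF)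
    (u : String) : dA.getD u [] = PySem.List.dedup (dB.getD u []) := by
  rw [PySem.Dict.getD, PySem.Dict.getD, get?_rel dA dB h1 u]
  cases dB.get? u <;> rfl

theorem pv_invariant (l : List (String × String))
    (dA dB : PySem.Dict String (List String)) (seen : PySem.Set (String × String))
    (h0 : dB.keys.Nodup)
    (h1 : dA.items = dB.items.map pvF)
    (h2 : ∀ u c, ((u, c) ∈ seen) ↔ c ∈ dB.getD u []) :
    (l.foldl
      (fun (st : PySem.Dict String (List String) × PySem.Set (String × String)) p =>
        if p.1 = "" ∨ p.2 = "" then st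
        else if PySem.Set.contains st.2 p then st
        else (st.1.modify p.1 [] (· ++ [p.2]), PySem.Set.add st.2 p))
      (dA, seen)).1.items
    = ((l.foldl
        (fun (d : PySem.Dict String (List String)) p =>
          if p.1 = "" ∨ p.2 = "" then d
          else d.modify p.1 [] (· ++ [p.2]))
        dB)).items.map pvF := by
  induction l generalizing dA dB seen with
  | nil => simpa using h1
  | cons p t ih =>
    simp only [List.foldl_cons]
    by_cases he : p.1 = "" ∨ p.2 = ""
    · rw [if_pos he, if_pos he]
      exact ih dA dB seen h0 h1 h2
    · rw [if_neg he, if_neg he]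
      set u := p.1 with hu
      set c := p.2 with hc
      set v := dB.getD u [] with hv
      have hmodB : dB.modify u [] (· ++ [c]) = dB.insert u (v ++ [c]) := rfl
      have hpe : (u, c) = p := Prod.mk.eta
      by_cases hs : p ∈ seen
      · -- pair already seen: A skips, B appends a duplicate that dedup removes
        rw [if_pos (by rw [PySem.Set.contains_iff]; exact hs)]
        have hcv : c ∈ v := (h2 u c).1 (by rw [hpe]; exact hs)
        -- get? u must be some v
        have hget : dB.get? u = some v := by
          cases hg : dB.get? u with
          | none => exfalso; rw [hv, PySem.Dict.getD, hg] at hcv; simp at hcv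
          | some w => rw [hv, PySem.Dict.getD, hg]; rfl
        have hcont : dB.contains u = true := by rw [contains_eq_isSome, hget]; rfl
        rw [hmodB]
        apply ih dA (dB.insert u (v ++ [c])) seen (keys_insert_nodup dB h0 u (v ++ [c]))
        · -- h1'
          rw [h1, PySem.Dict.insert, if_pos hcont]
          show _ = (dB.items.map _).map pvF
          rw [List.map_map]
          apply List.map_congr_left
          intro q hq
          by_cases hk : (q.1 == u) = true
          · have hfind := find_mem_nodup dB.items h0 q hq
            have : q.2 = v := by
              have : dB.get? q.1 = some q.2 := by
                rw [PySem.Dict.get?, hfind]; rfl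
              rw [eq_of_beq hk] at this
              rw [hget] at this; exact (Option.some.inj this).symm
            simp only [Function.comp_def, hk, if_pos]
            show pvF q = pvF (u, v ++ [c])
            rw [pvF, pvF]
            simp only []
            rw [dedup_snoc, if_pos hcv, ← eq_of_beq hk, this]
          · simp only [Function.comp_def, hk]
            rfl
        · -- h2'
          intro u' c'
          by_cases hu' : u' = u
          · subst hu'
            rw [PySem.Dict.getD, PySem.Dict.get?_insert_self]
            simp only [Option.getD_some, List.mem_append, List.mem_singleton]
            rw [h2 u c', ← hv]
            constructor
            · exact fun h => Or.inl h
            · rintro (h | rfl)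
              · exact h
              · exact hcv
          · rw [PySem.Dict.getD, PySem.Dict.get?_insert_of_ne dB (v ++ [c]) hu',
              ← PySem.Dict.getD]
            exact h2 u' c'
      · -- new pair
        rw [if_neg (by rw [PySem.Set.contains_iff]; exact hs)]
        have hcv : c ∉ v := fun h => hs (by rw [← hpe]; exact (h2 u c).2 h)
        have hgA : dA.getD u [] = PySem.List.dedup v := getD_rel dA dB h1 u
        have hmodA : dA.modify u [] (· ++ [c]) = dA.insert u (PySem.List.dedup v ++ [c]) := by
          rw [PySem.Dict.modify, hgA]
        rw [hmodA, hmodB]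
        apply ih (dA.insert u (PySem.List.dedup v ++ [c])) (dB.insert u (v ++ [c]))
          (PySem.Set.add seen p) (keys_insert_nodup dB h0 u (v ++ [c]))
        · -- h1'
          rw [PySem.Dict.insert, PySem.Dict.insert, contains_rel dA dB h1 u]
          by_cases hcont : dB.contains u = true
          · rw [if_pos hcont, if_pos hcont]
            show (dA.items.map _) = (dB.items.map _).map pvF
            rw [h1, List.map_map, List.map_map]
            apply List.map_congr_left
            intro q hq
            by_cases hk : (q.1 == u) = true
            · have hget : dB.get? u = some q.2 := by
                have hfind := find_mem_nodup dB.items h0 q hq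
                have : dB.get? q.1 = some q.2 := by rw [PySem.Dict.get?, hfind]; rfl
                rwa [eq_of_beq hk] at this
              have hqv : q.2 = v := by
                rw [hv, PySem.Dict.getD, hget]; rfl
              simp only [Function.comp_def, pvF, hk, if_pos]
              show (u, PySem.List.dedup v ++ [c]) = (u, PySem.List.dedup (v ++ [c]))
              rw [dedup_snoc, if_neg hcv]
            · simp only [Function.comp_def, pvF, hk]
              rfl
          · rw [if_neg hcont, if_neg hcont]
            have hvnil : v = [] := by
              rw [contains_eq_isSome] at hcont
              cases hg : dB.get? u with
              | none => rw [hv, PySem.Dict.getD, hg]; rfl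
              | some w => rw [hg] at hcont; simp at hcont
            show dA.items ++ [(u, PySem.List.dedup v ++ [c])]
              = (dB.items ++ [(u, v ++ [c])]).map pvF
            rw [List.map_append, h1, hvnil]
            rfl
        · -- h2'
          intro u' c'
          rw [PySem.Set.mem_add]
          by_cases hu' : u' = u
          · subst hu'
            rw [PySem.Dict.getD, PySem.Dict.get?_insert_self]
            simp only [Option.getD_some, List.mem_append, List.mem_singleton]
            rw [h2 u c', ← hv]
            constructor
            · rintro (h | h)
              · exact Or.inl h
              · exact Or.inr (congrArg Prod.snd (h.trans hpe.symm))
            · rintro (h | rfl)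
              · exact Or.inl h
              · exact Or.inr hpe
          · rw [PySem.Dict.getD, PySem.Dict.get?_insert_of_ne dB (v ++ [c]) hu',
              ← PySem.Dict.getD]
            constructor
            · rintro (h | h)
              · exact (h2 u' c').1 h
              · exact absurd (congrArg Prod.fst (h.trans hpe.symm)) hu'
            · exact fun h => Or.inl ((h2 u' c').2 h)

-- the skip-guarded fold over all entries is the plain fold over the filtered entries
theorem fold_skip_eq_fold_filter (l : List (String × String)) (d : PySem.Dict String (List String)) :
    l.foldl
      (fun (d : PySem.Dict String (List String)) p =>
        if p.1 = "" ∨ p.2 = "" then d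
        else d.modify p.1 [] (· ++ [p.2])) d
    = (l.filter (fun p => !(p.1 == "") && !(p.2 == ""))).foldl
        (fun (d : PySem.Dict String (List String)) p => d.modify p.1 [] (· ++ [p.2])) d := by
  rw [List.foldl_filter]
  have hfun : (fun (d : PySem.Dict String (List String)) (p : String × String) =>
      if p.1 = "" ∨ p.2 = "" then d else d.modify p.1 [] (· ++ [p.2]))
    = (fun (d : PySem.Dict String (List String)) (p : String × String) =>
      if (!(p.1 == "") && !(p.2 == "")) = true then d.modify p.1 [] (· ++ [p.2]) else d) := by
    funext d p
    by_cases h1 : p.1 = "" <;> by_cases h2 : p.2 = "" <;> simp [h1, h2]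
  rw [hfun]

-- the plain grouping fold's items, characterised key by key
theorem items_group_fold (v : List (String × String)) :
    (v.foldl (fun (d : PySem.Dict String (List String)) p => d.modify p.1 [] (· ++ [p.2]))
      PySem.Dict.empty).items
    = (PySem.List.dedup (v.map Prod.fst)).map
        (fun k => (k, (v.filter (fun p => p.1 == k)).map (fun q => q.2))) := by
  set G := v.foldl (fun (d : PySem.Dict String (List String)) p => d.modify p.1 [] (· ++ [p.2]))
    PySem.Dict.empty with hG
  have hnd : G.keys.Nodup := by
    rw [hG]
    exact PySem.Dict.nodup_keys_foldl_modify_key v Prod.fst [] (fun _ p => (· ++ [p.2]))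
      PySem.Dict.empty (by simp [PySem.Dict.empty, PySem.Dict.keys])
  have hkeys : G.keys = PySem.List.dedup (v.map Prod.fst) := by
    rw [hG, PySem.Dict.keys_foldl_modify_key v Prod.fst [] (fun _ p => (· ++ [p.2]))]
    rw [PySem.List.dedup_eq_ofList, ← PySem.Set.update_nil_left]
    rfl
  have hgetD : ∀ k, G.getD k [] = (v.filter (fun p => p.1 == k)).map (fun q => q.2) := by
    intro k
    rw [hG, PySem.Dict.getD_foldl_modify_append]
    simp [PySem.Dict.empty, PySem.Dict.getD, PySem.Dict.get?]
  rw [PySem.Dict.items_eq_map_keys G hnd [], hkeys]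
  exact List.map_congr_left (fun k _ => by rw [hgetD k])

-- ===== VERDICT (by name: the statement is the Claim_ definition above) =====
theorem build_cpe_index_spec : Claim_equal_build_cpe_index := by
  intro es _
  unfold Spec_build_cpe_index build_cpe_index build_cpe_index_alt
  have h := pv_invariant es PySem.Dict.empty PySem.Dict.empty PySem.Set.empty
    (by simp [PySem.Dict.empty, PySem.Dict.keys])
    (by simp [PySem.Dict.empty])
    (by intro u c; simp [PySem.Set.empty, PySem.Dict.empty, PySem.Dict.getD, PySem.Dict.get?])
  simp only []
  rw [h, fold_skip_eq_fold_filter, items_group_fold]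
  simp only [List.map_map]
  exact List.map_congr_left (fun k _ => rfl)
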